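-- pv_equiv track=rewrite | github.com/MateuszLakota/indico-data-exporter | submission/csv_submission_result_serializer.py | _squash_rows_if_possible
-- ===== SOURCE A (Python) =====
-- from typing import Dict, Any, List
--
-- def _squash_rows_if_possible(rows: List[Dict[str, str]]) -> List[Dict[str, str]]:
--     if len(rows) <= 1:
--         return rows
--
--     merged = rows[0].copy()
--
--     for row in rows[1:]:
--         for key, value in row.items():
--
--             if key in ("submission_id", "filename", "create_datetime"):
--                 continue
--
--             existing = merged.get(key, "")
--
--             if not existing and not value:
--                 continue
--
--             if not existing and value:
--                 merged[key] = value
--                 continue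
--
--             if existing and not value:
--                 continue
--
--             if existing == value:
--                 continue
--
--             return rows
--
--     return [merged]
-- ===== SOURCE B (Python) =====
-- def _squash_rows_if_possible(rows):
--     # Staged re-implementation: gather ALL distinct non-empty values per
--     # non-excluded key across every row first, then decide conflict, then
--     # build the merged row once.  Same return value as A.
--     if len(rows) <= 1:
--         return rows
--
--     seen = {}
--     for row in rows:
--         for key, value in row.items():
--             if key in ("submission_id", "filename", "create_datetime") or not value:
--                 continue
--             vals = seen.setdefault(key, [])
--             if value not in vals:
--                 vals.append(value)
--
--     if any(len(vals) > 1 for vals in seen.values()):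
--         return rows
--
--     merged = rows[0].copy()
--     for key, vals in seen.items():
--         merged[key] = vals[0]
--     return [merged]
-- ===== Notes on version B (the rewrite author's own statement) =====
-- stated objective: alternative
-- what changed: B replaces A's merge-while-checking with-early-return scan by three staged passes: first it gathers, without any early exit, the full list of distinct non-empty values of every non-excluded key over all rows (including rows[0]), then a separate pass checks whether any key collected two or more values (conflict => original rows), and only then does it build the merged row once from rows[0] plus each key's first value.
import Mathlib
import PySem

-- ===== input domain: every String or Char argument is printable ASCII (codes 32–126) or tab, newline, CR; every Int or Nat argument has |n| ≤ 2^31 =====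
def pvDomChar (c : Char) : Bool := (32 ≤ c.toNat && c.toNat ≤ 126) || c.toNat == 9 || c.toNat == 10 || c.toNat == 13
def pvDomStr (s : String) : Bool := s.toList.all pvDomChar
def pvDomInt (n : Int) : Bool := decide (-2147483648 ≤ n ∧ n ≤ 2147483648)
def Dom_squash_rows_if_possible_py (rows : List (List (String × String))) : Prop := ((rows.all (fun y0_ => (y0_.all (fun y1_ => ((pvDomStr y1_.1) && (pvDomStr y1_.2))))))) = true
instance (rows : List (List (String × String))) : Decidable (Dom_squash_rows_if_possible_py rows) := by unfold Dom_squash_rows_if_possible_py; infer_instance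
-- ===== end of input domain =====

-- B re-implements the squash in three staged passes (gather all distinct non-empty values per key
-- over every row, then a separate conflict check, then one build of the merged row) instead of A's
-- merge-while-checking scan with early return; alternative decomposition, same cost. Pre_ excludes
-- association lists with duplicate keys inside a row, which do not represent Python dicts.


-- ===== PORT A =====
-- 'key in ("submission_id", "filename", "create_datetime")'
def pvSkip (k : String) : Bool :=
  k == "submission_id" || k == "filename" || k == "create_datetime"

-- A's inner 'for key, value in row.items()' loop; none = the 'return rows' conflict exit
def pvAItems (merged : PySem.Dict String String) (items : List (String × String)) :
    Option (PySem.Dict String String) :=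
  match items with
  | [] => some merged
  | (key, value) :: rest =>
    if pvSkip key then pvAItems merged rest
    else
      let existing := merged.getD key ""
      if existing == "" && value == "" then pvAItems merged rest
      else if existing == "" && !(value == "") then pvAItems (merged.insert key value) rest
      else if !(existing == "") && value == "" then pvAItems merged rest
      else if existing == value then pvAItems merged rest
      else none

-- A's outer 'for row in rows[1:]' loop
def pvARows (merged : PySem.Dict String String) (rs : List (List (String × String))) :
    Option (PySem.Dict String String) :=
  match rs with
  | [] => some merged
  | row :: rest =>
    match pvAItems merged row with
    | none => none
    | some m => pvARows m rest

def squash_rows_if_possible_py (rows : List (List (String × String))) : List (List (String × String)) :=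
  if rows.length ≤ 1 then rows
  else
    match rows with
    | [] => rows
    | r0 :: rest =>
      match pvARows (PySem.Dict.mk r0) rest with
      | none => rows
      | some m => [m.items]

-- ===== PORT B =====
-- B's 'key in (...)' test
def pvSkipB (k : String) : Bool :=
  k == "submission_id" || k == "filename" || k == "create_datetime"

-- B's gathering pass over one row: 'vals = seen.setdefault(key, []); if value not in vals: vals.append(value)'
-- (setdefault-then-append ported as one insert of the extended list; same resulting dict)
def pvSeenItems (seen : PySem.Dict String (List String)) (items : List (String × String)) :
    PySem.Dict String (List String) :=
  match items with
  | [] => seen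
  | (key, value) :: rest =>
    if pvSkipB key || value == "" then pvSeenItems seen rest
    else
      match seen.get? key with
      | none => pvSeenItems (seen.insert key [value]) rest
      | some vs => if value ∈ vs then pvSeenItems seen rest
                   else pvSeenItems (seen.insert key (vs ++ [value])) rest

-- B's 'for row in rows' gathering loop (no early exit)
def pvSeenRows (seen : PySem.Dict String (List String)) (rs : List (List (String × String))) :
    PySem.Dict String (List String) :=
  match rs with
  | [] => seen
  | row :: rest => pvSeenRows (pvSeenItems seen row) rest

-- 'any(len(vals) > 1 for vals in seen.values())'
def pvConflict (seen : PySem.Dict String (List String)) : Bool :=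
  seen.items.any (fun kv => decide (1 < kv.2.length))

def squash_rows_if_possible_py_alt (rows : List (List (String × String))) : List (List (String × String)) :=
  if rows.length ≤ 1 then rows
  else
    match rows with
    | [] => rows
    | r0 :: _ =>
      let seen := pvSeenRows PySem.Dict.empty rows
      if pvConflict seen then rows
      else
        -- 'merged[key] = vals[0]': every list in seen is nonempty by construction, so headD is exact
        [ (seen.items.foldl (fun d kv => d.insert kv.1 (kv.2.headD "")) (PySem.Dict.mk r0)).items ]

-- ===== PRECONDITION & SPEC =====
-- Pre_ excludes inputs in which some row's association list repeats a key: such a list does not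
-- represent a Python dict (A's parameter type), so neither behaviour is A's to specify.
def Pre_squash_rows_if_possible_py (rows : List (List (String × String))) : Prop :=
  ∀ row ∈ rows, (row.map Prod.fst).Nodup
instance (rows : List (List (String × String))) : Decidable (Pre_squash_rows_if_possible_py rows) := by unfold Pre_squash_rows_if_possible_py; infer_instance

def pvWitness_squash_rows_if_possible_py : (List (List (String × String))) :=
  [[("submission_id", "1"), ("name", "Ann"), ("mark", "")],
   [("submission_id", "2"), ("name", "Ann"), ("mark", "7")]]

def Spec_squash_rows_if_possible_py (rows : List (List (String × String))) (out : List (List (String × String))) : Prop := out = squash_rows_if_possible_py_alt rows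
instance (rows : List (List (String × String))) (out : List (List (String × String))) : Decidable (Spec_squash_rows_if_possible_py rows out) := by unfold Spec_squash_rows_if_possible_py; infer_instance

-- ===== CLAIM (what is proved, stated in full; the proofs are below) =====
def Claim_equal_squash_rows_if_possible_py : Prop := ∀ (rows : List (List (String × String))), Dom_squash_rows_if_possible_py rows → Pre_squash_rows_if_possible_py rows → Spec_squash_rows_if_possible_py rows (squash_rows_if_possible_py rows)

-- ===== LEMMAS AND PROOFS =====

theorem pvSkipB_eq (k : String) : pvSkipB k = pvSkip k := rfl

-- the merged dict B builds at the end, as a function of the collected 'seen' dict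
def pvMerge (r0 : List (String × String)) (s : PySem.Dict String (List String)) :
    PySem.Dict String String :=
  s.items.foldl (fun d kv => d.insert kv.1 (kv.2.headD "")) (PySem.Dict.mk r0)

-- well-formedness of the 'seen' dict that survives any further scanning
def pvWf (s : PySem.Dict String (List String)) : Prop :=
  s.keys.Nodup ∧ ∀ kv ∈ s.items, kv.2 ≠ []

-- the simulation invariant between A's 'merged' and B's 'seen'
def pvInv (r0 : List (String × String)) (m : PySem.Dict String String)
    (s : PySem.Dict String (List String)) : Prop :=
  m = pvMerge r0 s ∧
  s.keys.Nodup ∧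
  (∀ k vs, s.get? k = some vs → ∃ v, vs = [v] ∧ v ≠ "" ∧ pvSkip k = false) ∧
  (∀ k, pvSkip k = false → s.get? k = none →
      (PySem.Dict.mk r0).get? k = none ∨ (PySem.Dict.mk r0).get? k = some "")

theorem foldl_insert_get? (l : List (String × String)) (hl : (l.map Prod.fst).Nodup)
    (d : PySem.Dict String String) (k : String) :
    (l.foldl (fun d kv => d.insert kv.1 kv.2) d).get? k =
      ((PySem.Dict.mk l).get? k).or (d.get? k) := by
  induction l generalizing d with
  | nil => simp [PySem.Dict.get?]
  | cons a rest ih =>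
    obtain ⟨ak, av⟩ := a
    simp only [List.map_cons, List.nodup_cons] at hl
    rw [List.foldl_cons, ih hl.2, PySem.Dict.get?_mk_cons]
    by_cases hk : ak = k
    · subst hk
      have hnone : (PySem.Dict.mk rest).get? ak = none := by
        rw [PySem.Dict.get?_eq_none_iff_not_mem_keys]
        simpa using hl.1
      simp [hnone, PySem.Dict.get?_insert_self]
    · have : (d.insert ak av).get? k = d.get? k :=
        PySem.Dict.get?_insert_of_ne _ _ (fun h => hk h.symm)
      simp [hk, this]

theorem insert_self_eq (d : PySem.Dict String String) (k v : String)
    (hnd : d.keys.Nodup) (h : d.get? k = some v) : d.insert k v = d := by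
  apply PySem.Dict.ext
  have hc : d.contains k = true := by
    rw [PySem.Dict.contains_eq_isSome_get?, h]; rfl
  rw [PySem.Dict.items_insert_of_contains d v hc]
  have hid : ∀ p ∈ d.items, (fun p => if (p.1 == k) = true then (k, v) else p) p = p := by
    intro p hp
    obtain ⟨p1, p2⟩ := p
    by_cases hpk : p1 = k
    · subst hpk
      have := PySem.Dict.get?_of_mem_items d hp hnd
      rw [h] at this
      simp_all
    · simp [hpk]
  rw [show List.map _ d.items = d.items.map id from List.map_congr_left hid, List.map_id]

-- a fold that re-inserts values a dict already holds leaves it unchanged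
theorem foldl_insert_id (l : List (String × String)) (d : PySem.Dict String String)
    (hnd : d.keys.Nodup) (h : ∀ kv ∈ l, d.get? kv.1 = some kv.2) :
    l.foldl (fun d kv => d.insert kv.1 kv.2) d = d := by
  induction l with
  | nil => rfl
  | cons a rest ih =>
    rw [List.foldl_cons, insert_self_eq d a.1 a.2 hnd (h a (List.mem_cons_self))]
    exact ih (fun kv hm => h kv (List.mem_cons_of_mem _ hm))

-- looking up a key in 'Dict.mk' of the head-projected items
theorem get?_mk_map_head (l : List (String × List String)) (k : String) :
    (PySem.Dict.mk (l.map (fun kv => (kv.1, kv.2.headD "")))).get? k =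
      ((PySem.Dict.mk l).get? k).map (fun vs => vs.headD "") := by
  induction l with
  | nil => simp [PySem.Dict.get?]
  | cons a rest ih =>
    obtain ⟨ak, avs⟩ := a
    simp only [List.map_cons]
    rw [PySem.Dict.get?_mk_cons, PySem.Dict.get?_mk_cons]
    by_cases hk : (ak == k) = true
    · simp [hk]
    · rw [if_neg hk, if_neg hk]; exact ih

theorem mk_items (d : PySem.Dict String (List String)) : PySem.Dict.mk d.items = d := by
  apply PySem.Dict.ext; rfl

-- lookup in B's final merged dict
theorem pvMerge_get? (r0 : List (String × String)) (s : PySem.Dict String (List String))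
    (hnd : s.keys.Nodup) (k : String) :
    (pvMerge r0 s).get? k =
      ((s.get? k).map (fun vs => vs.headD "")).or ((PySem.Dict.mk r0).get? k) := by
  unfold pvMerge
  have hfold : s.items.foldl (fun d kv => d.insert kv.1 (kv.2.headD "")) (PySem.Dict.mk r0) =
      (s.items.map (fun kv => (kv.1, kv.2.headD ""))).foldl
        (fun d kv => d.insert kv.1 kv.2) (PySem.Dict.mk r0) := by
    rw [List.foldl_map]
  have hndm : ((s.items.map (fun kv => (kv.1, kv.2.headD ""))).map Prod.fst).Nodup := by
    rw [List.map_map]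
    simpa [PySem.Dict.keys, Function.comp] using hnd
  rw [hfold, foldl_insert_get? _ hndm, get?_mk_map_head, mk_items]

-- one gathering step preserves well-formedness
theorem pvSeen_wf (l : List (String × String)) (s : PySem.Dict String (List String))
    (h : pvWf s) : pvWf (pvSeenItems s l) := by
  induction l generalizing s with
  | nil => exact h
  | cons a rest ih =>
    obtain ⟨key, value⟩ := a
    obtain ⟨hnd, hne⟩ := h
    by_cases hs : (pvSkipB key || (value == "")) = true
    · rw [show pvSeenItems s ((key, value) :: rest) = pvSeenItems s rest from by
        simp [pvSeenItems, hs]]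
      exact ih s ⟨hnd, hne⟩
    · cases hg : s.get? key with
      | none =>
        rw [show pvSeenItems s ((key, value) :: rest) = pvSeenItems (s.insert key [value]) rest from by
          simp [pvSeenItems, hs, hg]]
        have hnc : s.contains key = false := by
          rw [PySem.Dict.contains_eq_isSome_get?, hg]; rfl
        refine ih _ ⟨?_, ?_⟩
        · rw [PySem.Dict.keys_insert_of_not_contains s [value] hnc]
          simp only [List.nodup_append, List.nodup_singleton, true_and]
          have hknotin : key ∉ s.keys := by
            rw [← PySem.Dict.get?_eq_none_iff_not_mem_keys]; exact hg
          refine ⟨hnd, ?_⟩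
          intro x hx y hy heq
          rw [List.mem_singleton] at hy
          exact hknotin (hy ▸ heq ▸ hx)
        · intro kv hm
          rw [PySem.Dict.items_insert_of_not_contains s [value] hnc] at hm
          rcases List.mem_append.1 hm with hm | hm
          · exact hne kv hm
          · rw [List.mem_singleton] at hm; subst hm; simp
      | some vs =>
        by_cases hv : value ∈ vs
        · rw [show pvSeenItems s ((key, value) :: rest) = pvSeenItems s rest from by
            simp [pvSeenItems, hs, hg, hv]]
          exact ih s ⟨hnd, hne⟩
        · rw [show pvSeenItems s ((key, value) :: rest) =
              pvSeenItems (s.insert key (vs ++ [value])) rest from by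
            simp [pvSeenItems, hs, hg, hv]]
          have hc : s.contains key = true := by
            rw [PySem.Dict.contains_eq_isSome_get?, hg]; rfl
          refine ih _ ⟨?_, ?_⟩
          · rw [PySem.Dict.keys_insert_of_contains s (vs ++ [value]) hc]; exact hnd
          · intro kv hm
            rw [PySem.Dict.items_insert_of_contains s (vs ++ [value]) hc] at hm
            rcases List.mem_map.1 hm with ⟨p, hp, hpe⟩
            by_cases hpk : (p.1 == key) = true
            · rw [if_pos hpk] at hpe; subst hpe; simp
            · rw [if_neg hpk] at hpe; subst hpe; exact hne p hp

-- a conflict already gathered survives the rest of the scan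
theorem pvConflict_mono_items (l : List (String × String)) (s : PySem.Dict String (List String))
    (hwf : pvWf s) (hc : pvConflict s = true) : pvConflict (pvSeenItems s l) = true := by
  induction l generalizing s with
  | nil => exact hc
  | cons a rest ih =>
    obtain ⟨key, value⟩ := a
    obtain ⟨hnd, hne⟩ := hwf
    by_cases hs : (pvSkipB key || (value == "")) = true
    · rw [show pvSeenItems s ((key, value) :: rest) = pvSeenItems s rest from by
        simp [pvSeenItems, hs]]
      exact ih s ⟨hnd, hne⟩ hc
    · cases hg : s.get? key with
      | none =>
        rw [show pvSeenItems s ((key, value) :: rest) = pvSeenItems (s.insert key [value]) rest from by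
          simp [pvSeenItems, hs, hg]]
        have hnc : s.contains key = false := by
          rw [PySem.Dict.contains_eq_isSome_get?, hg]; rfl
        have hwf' : pvWf (s.insert key [value]) := by
          have := pvSeen_wf [] (s.insert key [value])
          refine ⟨?_, ?_⟩
          · rw [PySem.Dict.keys_insert_of_not_contains s [value] hnc]
            simp only [List.nodup_append, List.nodup_singleton, true_and]
            have hknotin : key ∉ s.keys := by
              rw [← PySem.Dict.get?_eq_none_iff_not_mem_keys]; exact hg
            refine ⟨hnd, ?_⟩
            intro x hx y hy heq
            rw [List.mem_singleton] at hy
            exact hknotin (hy ▸ heq ▸ hx)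
          · intro kv hm
            rw [PySem.Dict.items_insert_of_not_contains s [value] hnc] at hm
            rcases List.mem_append.1 hm with hm | hm
            · exact hne kv hm
            · rw [List.mem_singleton] at hm; subst hm; simp
        refine ih _ hwf' ?_
        unfold pvConflict at hc ⊢
        rw [PySem.Dict.items_insert_of_not_contains s [value] hnc, List.any_append, hc]
        rfl
      | some vs =>
        by_cases hv : value ∈ vs
        · rw [show pvSeenItems s ((key, value) :: rest) = pvSeenItems s rest from by
            simp [pvSeenItems, hs, hg, hv]]
          exact ih s ⟨hnd, hne⟩ hc
        · rw [show pvSeenItems s ((key, value) :: rest) =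
              pvSeenItems (s.insert key (vs ++ [value])) rest from by
            simp [pvSeenItems, hs, hg, hv]]
          have hc' : s.contains key = true := by
            rw [PySem.Dict.contains_eq_isSome_get?, hg]; rfl
          have hwf' : pvWf (s.insert key (vs ++ [value])) := by
            refine ⟨?_, ?_⟩
            · rw [PySem.Dict.keys_insert_of_contains s (vs ++ [value]) hc']; exact hnd
            · intro kv hm
              rw [PySem.Dict.items_insert_of_contains s (vs ++ [value]) hc'] at hm
              rcases List.mem_map.1 hm with ⟨p, hp, hpe⟩
              by_cases hpk : (p.1 == key) = true
              · rw [if_pos hpk] at hpe; subst hpe; simp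
              · rw [if_neg hpk] at hpe; subst hpe; exact hne p hp
          refine ih _ hwf' ?_
          unfold pvConflict at hc ⊢
          rcases List.any_eq_true.1 hc with ⟨q, hq, hql⟩
          rw [PySem.Dict.items_insert_of_contains s (vs ++ [value]) hc']
          apply List.any_eq_true.2
          by_cases hqk : (q.1 == key) = true
          · refine ⟨(key, vs ++ [value]), List.mem_map.2 ⟨q, hq, by rw [if_pos hqk]⟩, ?_⟩
            have hqkey : q.1 = key := by simpa using hqk
            have : s.get? q.1 = some q.2 := PySem.Dict.get?_of_mem_items s hq hnd
            rw [hqkey, hg] at this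
            have hvs : vs = q.2 := by cases this; rfl
            simp only [decide_eq_true_eq] at hql ⊢
            rw [List.length_append, hvs]
            omega
          · exact ⟨q, List.mem_map.2 ⟨q, hq, by rw [if_neg hqk]⟩, hql⟩

theorem pvConflict_mono_rows (rs : List (List (String × String)))
    (s : PySem.Dict String (List String)) (hwf : pvWf s) (hc : pvConflict s = true) :
    pvConflict (pvSeenRows s rs) = true := by
  induction rs generalizing s with
  | nil => exact hc
  | cons row rest ih =>
    exact ih _ (pvSeen_wf row s hwf) (pvConflict_mono_items row s hwf hc)

-- gathering a row whose keys are all fresh just appends the filtered singletons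
theorem pvSeenItems_fresh (l : List (String × String)) (s : PySem.Dict String (List String))
    (hnd : (l.map Prod.fst).Nodup) (hdisj : ∀ kv ∈ l, s.get? kv.1 = none) :
    pvSeenItems s l =
      PySem.Dict.mk (s.items ++ (l.filter (fun kv => !pvSkip kv.1 && !(kv.2 == ""))).map
        (fun kv => (kv.1, [kv.2]))) := by
  induction l generalizing s with
  | nil => simp [pvSeenItems, mk_items]
  | cons a rest ih =>
    obtain ⟨ak, av⟩ := a
    simp only [List.map_cons, List.nodup_cons] at hnd
    by_cases hs : (pvSkip ak || (av == "")) = true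
    · have hfc : (!pvSkip ak && !(av == "")) = false := by
        rcases Bool.or_eq_true_iff.1 hs with h | h <;> simp [h]
      rw [show pvSeenItems s ((ak, av) :: rest) = pvSeenItems s rest from by
            simp [pvSeenItems, pvSkipB_eq, hs],
          ih s hnd.2 (fun kv hm => hdisj kv (List.mem_cons_of_mem _ hm)),
          List.filter_cons, hfc]
      simp
    · have hsk : pvSkip ak = false := by
        cases h : pvSkip ak <;> simp_all
      have hav : (av == "") = false := by
        cases h : (av == "") <;> simp_all
      have hnone : s.get? ak = none := hdisj (ak, av) List.mem_cons_self
      have hnc : s.contains ak = false := by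
        rw [PySem.Dict.contains_eq_isSome_get?, hnone]; rfl
      have hstep : pvSeenItems s ((ak, av) :: rest) = pvSeenItems (s.insert ak [av]) rest := by
        simp [pvSeenItems, pvSkipB_eq, hsk, hav, hnone]
      have hdisj' : ∀ kv ∈ rest, (s.insert ak [av]).get? kv.1 = none := by
        intro kv hm
        have hne : kv.1 ≠ ak := fun h => hnd.1 (h ▸ List.mem_map_of_mem hm)
        rw [PySem.Dict.get?_insert_of_ne _ _ hne]
        exact hdisj kv (List.mem_cons_of_mem _ hm)
      rw [hstep, ih (s.insert ak [av]) hnd.2 hdisj',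
          PySem.Dict.items_insert_of_not_contains s [av] hnc, List.filter_cons]
      simp [hsk, hav]

-- invariant after B has gathered rows[0] (A has not moved yet)
theorem pvInv_init (r0 : List (String × String)) (hnd : (r0.map Prod.fst).Nodup) :
    pvInv r0 (PySem.Dict.mk r0) (pvSeenItems PySem.Dict.empty r0) := by
  have hkeys0 : (PySem.Dict.mk r0).keys.Nodup := by simpa using hnd
  have hd : ∀ kv ∈ r0, (PySem.Dict.empty : PySem.Dict String (List String)).get? kv.1 = none := by
    intro kv _; simp [PySem.Dict.get?_empty]
  have hS : pvSeenItems PySem.Dict.empty r0 =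
      PySem.Dict.mk ((r0.filter (fun kv => !pvSkip kv.1 && !(kv.2 == ""))).map
        (fun kv => (kv.1, [kv.2]))) := by
    simpa using pvSeenItems_fresh r0 PySem.Dict.empty hnd hd
  have hfnd : (((r0.filter (fun kv => !pvSkip kv.1 && !(kv.2 == ""))).map Prod.fst)).Nodup :=
    ((List.filter_sublist (l := r0)).map Prod.fst).nodup hnd
  have hskeys : (pvSeenItems PySem.Dict.empty r0).keys.Nodup := by
    rw [hS]
    simpa [PySem.Dict.keys, List.map_map, Function.comp] using hfnd
  refine ⟨?_, hskeys, ?_, ?_⟩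
  · unfold pvMerge
    rw [hS]
    have : (((r0.filter (fun kv => !pvSkip kv.1 && !(kv.2 == ""))).map
        (fun kv => (kv.1, [kv.2]))) : List (String × List String)).foldl
          (fun d kv => d.insert kv.1 (kv.2.headD "")) (PySem.Dict.mk r0) =
        (r0.filter (fun kv => !pvSkip kv.1 && !(kv.2 == ""))).foldl
          (fun d kv => d.insert kv.1 kv.2) (PySem.Dict.mk r0) := by
      rw [List.foldl_map]
      rfl
    rw [show (PySem.Dict.mk ((r0.filter (fun kv => !pvSkip kv.1 && !(kv.2 == ""))).map
        (fun kv => (kv.1, [kv.2])))).items =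
        ((r0.filter (fun kv => !pvSkip kv.1 && !(kv.2 == ""))).map (fun kv => (kv.1, [kv.2]))) from rfl,
      this]
    refine (foldl_insert_id _ _ hkeys0 ?_).symm
    intro kv hm
    exact PySem.Dict.get?_of_mem_items _ (List.mem_of_mem_filter hm) hkeys0
  · intro k vs h
    rw [hS] at h
    have hm := PySem.Dict.mem_items_of_get?_eq_some _ h
    rcases List.mem_map.1 hm with ⟨p, hp, hpe⟩
    have hf := (List.mem_filter.1 hp).2
    obtain ⟨hk, hv⟩ := by simpa using hf
    refine ⟨p.2, ?_, hv, ?_⟩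
    · cases hpe; rfl
    · cases hpe; exact hk
  · intro k hskf hnone
    cases hget : (PySem.Dict.mk r0).get? k with
    | none => exact Or.inl rfl
    | some v =>
      right
      have hm := PySem.Dict.mem_items_of_get?_eq_some _ hget
      by_cases hv : v = ""
      · simp [hv]
      · exfalso
        have hmf : (k, v) ∈ r0.filter (fun kv => !pvSkip kv.1 && !(kv.2 == "")) :=
          List.mem_filter.2 ⟨hm, by simp [hskf, hv]⟩
        have hmf2 : (k, [v]) ∈ (r0.filter (fun kv => !pvSkip kv.1 && !(kv.2 == ""))).map
            (fun kv => (kv.1, [kv.2])) := List.mem_map.2 ⟨(k, v), hmf, rfl⟩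
        have hskeys2 : (PySem.Dict.mk ((r0.filter (fun kv => !pvSkip kv.1 && !(kv.2 == ""))).map
            (fun kv => (kv.1, [kv.2])))).keys.Nodup := by rw [← hS]; exact hskeys
        have := PySem.Dict.get?_of_mem_items _ hmf2 hskeys2
        rw [← hS, hnone] at this
        simp at this

-- pvInv implies pvWf and the absence of a conflict
theorem pvInv_wf (r0 : List (String × String)) (m : PySem.Dict String String)
    (s : PySem.Dict String (List String)) (h : pvInv r0 m s) : pvWf s := by
  obtain ⟨-, hnd, hvals, -⟩ := h
  refine ⟨hnd, ?_⟩
  intro kv hm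
  have := PySem.Dict.get?_of_mem_items s hm hnd
  rcases hvals kv.1 kv.2 this with ⟨v, hv, -, -⟩
  simp [hv]

theorem pvInv_noConflict (r0 : List (String × String)) (m : PySem.Dict String String)
    (s : PySem.Dict String (List String)) (h : pvInv r0 m s) : pvConflict s = false := by
  obtain ⟨-, hnd, hvals, -⟩ := h
  unfold pvConflict
  rw [List.any_eq_false]
  intro kv hm
  have := PySem.Dict.get?_of_mem_items s hm hnd
  rcases hvals kv.1 kv.2 this with ⟨v, hv, -, -⟩
  simp [hv]

-- the per-row simulation step
theorem pvStep_items (l : List (String × String)) (r0 : List (String × String))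
    (m : PySem.Dict String String) (s : PySem.Dict String (List String))
    (hinv : pvInv r0 m s) :
    (pvAItems m l = none ∧ pvConflict (pvSeenItems s l) = true) ∨
    (∃ m', pvAItems m l = some m' ∧ pvInv r0 m' (pvSeenItems s l)) := by
  induction l generalizing m s with
  | nil => exact Or.inr ⟨m, rfl, hinv⟩
  | cons a rest ih =>
    obtain ⟨key, value⟩ := a
    obtain ⟨hm, hnd, hvals, hcov⟩ := hinv
    by_cases hsk : pvSkip key = true
    · have hA : pvAItems m ((key, value) :: rest) = pvAItems m rest := by
        simp [pvAItems, hsk]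
      have hB : pvSeenItems s ((key, value) :: rest) = pvSeenItems s rest := by
        simp [pvSeenItems, pvSkipB_eq, hsk]
      rw [hA, hB]
      exact ih m s ⟨hm, hnd, hvals, hcov⟩
    · have hsk' : pvSkip key = false := by cases h : pvSkip key <;> simp_all
      have hget : m.get? key =
          ((s.get? key).map (fun vs => vs.headD "")).or ((PySem.Dict.mk r0).get? key) := by
        rw [hm]; exact pvMerge_get? r0 s hnd key
      by_cases hv : (value == "") = true
      · have hveq : value = "" := by simpa using hv
        subst hveq
        have hB : pvSeenItems s ((key, "") :: rest) = pvSeenItems s rest := by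
          simp [pvSeenItems]
        have hA : pvAItems m ((key, "") :: rest) = pvAItems m rest := by
          by_cases he : (m.getD key "" == "") = true <;> simp [pvAItems, hsk', he]
        rw [hA, hB]
        exact ih m s ⟨hm, hnd, hvals, hcov⟩
      · have hv' : (value == "") = false := by cases h : (value == "") <;> simp_all
        cases hf : s.get? key with
        | some vs =>
          rcases hvals key vs hf with ⟨w, hvsw, hwne, -⟩
          subst hvsw
          have hex : m.getD key "" = w := by
            rw [PySem.Dict.getD_eq_get?_getD, hget, hf]; rfl
          have hwne' : (w == "") = false := by simp [hwne]
          by_cases hwv : w = value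
          · subst hwv
            have hA : pvAItems m ((key, w) :: rest) = pvAItems m rest := by
              simp [pvAItems, hsk', hex, hwne']
            have hB : pvSeenItems s ((key, w) :: rest) = pvSeenItems s rest := by
              simp [pvSeenItems, pvSkipB_eq, hsk', hv', hf]
            rw [hA, hB]
            exact ih m s ⟨hm, hnd, hvals, hcov⟩
          · have hwv' : (w == value) = false := by simp [hwv]
            have hA : pvAItems m ((key, value) :: rest) = none := by
              simp [pvAItems, hsk', hex, hwne', hv', hwv']
            have hnotmem : value ∉ [w] := by simp [Ne.symm hwv]
            have hB : pvSeenItems s ((key, value) :: rest) =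
                pvSeenItems (s.insert key ([w] ++ [value])) rest := by
              simp [pvSeenItems, pvSkipB_eq, hsk', hv', hf, hnotmem]
            have hc : s.contains key = true := by
              rw [PySem.Dict.contains_eq_isSome_get?, hf]; rfl
            have hwf' : pvWf (s.insert key ([w] ++ [value])) := by
              refine ⟨?_, ?_⟩
              · rw [PySem.Dict.keys_insert_of_contains s ([w] ++ [value]) hc]; exact hnd
              · intro kv hmm
                rw [PySem.Dict.items_insert_of_contains s ([w] ++ [value]) hc] at hmm
                rcases List.mem_map.1 hmm with ⟨p, hp, hpe⟩
                by_cases hpk : (p.1 == key) = true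
                · rw [if_pos hpk] at hpe; subst hpe; simp
                · rw [if_neg hpk] at hpe; subst hpe
                  have := PySem.Dict.get?_of_mem_items s hp hnd
                  rcases hvals p.1 p.2 this with ⟨v, hv, -, -⟩
                  simp [hv]
            have hconf : pvConflict (s.insert key ([w] ++ [value])) = true := by
              unfold pvConflict
              apply List.any_eq_true.2
              have hmem : (key, [w]) ∈ s.items := PySem.Dict.mem_items_of_get?_eq_some _ hf
              refine ⟨(key, [w] ++ [value]), ?_, by simp⟩
              rw [PySem.Dict.items_insert_of_contains s ([w] ++ [value]) hc]
              exact List.mem_map.2 ⟨(key, [w]), hmem, by simp⟩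
            rw [hA, hB]
            exact Or.inl ⟨rfl, pvConflict_mono_items rest _ hwf' hconf⟩
        | none =>
          have hr0 := hcov key hsk' hf
          have hex : m.getD key "" = "" := by
            rw [PySem.Dict.getD_eq_get?_getD, hget, hf]
            rcases hr0 with h | h <;> simp [h]
          have hA : pvAItems m ((key, value) :: rest) = pvAItems (m.insert key value) rest := by
            simp [pvAItems, hsk', hex, hv']
          have hB : pvSeenItems s ((key, value) :: rest) =
              pvSeenItems (s.insert key [value]) rest := by
            simp [pvSeenItems, pvSkipB_eq, hsk', hv', hf]
          rw [hA, hB]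
          have hnc : s.contains key = false := by
            rw [PySem.Dict.contains_eq_isSome_get?, hf]; rfl
          have hknotin : key ∉ s.keys := by
            rw [← PySem.Dict.get?_eq_none_iff_not_mem_keys]; exact hf
          refine ih (m.insert key value) (s.insert key [value]) ⟨?_, ?_, ?_, ?_⟩
          · unfold pvMerge
            rw [PySem.Dict.items_insert_of_not_contains s [value] hnc, List.foldl_append, hm]
            rfl
          · rw [PySem.Dict.keys_insert_of_not_contains s [value] hnc]
            simp only [List.nodup_append, List.nodup_singleton, true_and]
            refine ⟨hnd, ?_⟩
            intro a ha b hb heq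
            rw [List.mem_singleton] at hb
            subst hb
            exact hknotin (heq ▸ ha)
          · intro k vs h
            rw [PySem.Dict.get?_insert] at h
            by_cases hk : k = key
            · subst hk
              rw [if_pos rfl] at h
              cases h
              exact ⟨value, rfl, by simpa using hv', hsk'⟩
            · rw [if_neg hk] at h
              exact hvals k vs h
          · intro k hskk h
            rw [PySem.Dict.get?_insert] at h
            by_cases hk : k = key
            · rw [if_pos hk] at h; cases h
            · rw [if_neg hk] at h
              exact hcov k hskk h

theorem pvStep_rows (rs : List (List (String × String))) (r0 : List (String × String))
    (m : PySem.Dict String String) (s : PySem.Dict String (List String))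
    (hinv : pvInv r0 m s) :
    (pvARows m rs = none ∧ pvConflict (pvSeenRows s rs) = true) ∨
    (∃ m', pvARows m rs = some m' ∧ pvInv r0 m' (pvSeenRows s rs)) := by
  induction rs generalizing m s with
  | nil => exact Or.inr ⟨m, rfl, hinv⟩
  | cons row rest ih =>
    have hrows : pvSeenRows s (row :: rest) = pvSeenRows (pvSeenItems s row) rest := by
      simp [pvSeenRows]
    rcases pvStep_items row r0 m s hinv with ⟨hA, hB⟩ | ⟨m', hA, hinv'⟩
    · refine Or.inl ⟨by simp [pvARows, hA], ?_⟩
      rw [hrows]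
      exact pvConflict_mono_rows rest _ (pvSeen_wf row s ⟨hinv.2.1, (pvInv_wf r0 m s hinv).2⟩) hB
    · rcases ih m' (pvSeenItems s row) hinv' with ⟨hA2, hB2⟩ | ⟨m2, hA2, hinv2⟩
      · exact Or.inl ⟨by simp [pvARows, hA, hA2], by rw [hrows]; exact hB2⟩
      · exact Or.inr ⟨m2, by simp [pvARows, hA, hA2], by rw [hrows]; exact hinv2⟩

-- ===== VERDICT (by name: the statement is the Claim_ definition above) =====
theorem squash_rows_if_possible_py_spec : Claim_equal_squash_rows_if_possible_py := by
  intro rows _ hpre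
  unfold Spec_squash_rows_if_possible_py
  by_cases hlen : rows.length ≤ 1
  · simp [squash_rows_if_possible_py, squash_rows_if_possible_py_alt, hlen]
  · cases rows with
    | nil => simp at hlen
    | cons r0 rest =>
      have hnd0 : (r0.map Prod.fst).Nodup := hpre r0 List.mem_cons_self
      have hinv := pvInv_init r0 hnd0
      have hseen : pvSeenRows PySem.Dict.empty (r0 :: rest) =
          pvSeenRows (pvSeenItems PySem.Dict.empty r0) rest := by
        simp [pvSeenRows]
      rcases pvStep_rows rest r0 _ _ hinv with ⟨hA, hB⟩ | ⟨m', hA, hinv'⟩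
      · simp [squash_rows_if_possible_py, squash_rows_if_possible_py_alt, hA, hseen, hB]
      · have hnoc : pvConflict (pvSeenRows (pvSeenItems PySem.Dict.empty r0) rest) = false :=
          pvInv_noConflict r0 m' _ hinv'
        simp [squash_rows_if_possible_py, squash_rows_if_possible_py_alt, hA, hseen, hnoc]
        rw [hinv'.1]
        have hrest : rest ≠ [] := by intro h; subst h; simp at hlen
        rw [if_neg hrest, if_neg hrest]
        simp [pvMerge, List.headD_eq_head?_getD]
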